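-- pv_equiv track=rewrite | github.com/pypi-data/pypi-mirror-285 | packages/mygnuhealth/mygnuhealth-2.2.1.tar.gz/mygnuhealth-2.2.1/mygnuhealth/core.py | scale_xaxis
-- ===== SOURCE A (Python) =====
-- import math
--
-- def scale_xaxis(series_length, x_values):
--     """ The method produces an array based on the original x_values
--         of 15 elements or less, interspaced by the length of the array
--         over MAX_LABELS
--     """
--     MAX_LABELS = 15
--
--     index = 1
--     counter = 0
--     step = math.ceil(series_length / MAX_LABELS)
--
--     while (step > 1 and index < series_length):
--         if counter < step:
--             x_values[index] = None
--             counter = counter + 1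
--         else:
--             counter = 0
--
--         index = index + 1
--
--     return x_values
-- ===== SOURCE B (Python) =====
-- import math
--
-- def scale_xaxis(series_length, x_values):
--     """Cap x-axis labels at 15: kept positions form the arithmetic progression
--     range(0, series_length, step+1); blank each run between consecutive kept
--     positions with one block slice assignment (mutates x_values in place)."""
--     step = math.ceil(series_length / 15)
--     if step > 1:
--         for kept in range(0, series_length, step + 1):
--             lo = kept + 1
--             hi = min(kept + step + 1, series_length)
--             x_values[lo:hi] = [None] * (hi - lo)
--     return x_values
-- ===== Notes on version B (the rewrite author's own statement) =====
-- stated objective: alternative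
-- what changed: Replaces A's per-element while loop with its counter state machine by a staged block algorithm: the kept positions are computed as the arithmetic progression range(0, series_length, step+1) and the whole run between consecutive kept positions is blanked with one slice assignment of a [None]*k block.
import Mathlib
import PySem

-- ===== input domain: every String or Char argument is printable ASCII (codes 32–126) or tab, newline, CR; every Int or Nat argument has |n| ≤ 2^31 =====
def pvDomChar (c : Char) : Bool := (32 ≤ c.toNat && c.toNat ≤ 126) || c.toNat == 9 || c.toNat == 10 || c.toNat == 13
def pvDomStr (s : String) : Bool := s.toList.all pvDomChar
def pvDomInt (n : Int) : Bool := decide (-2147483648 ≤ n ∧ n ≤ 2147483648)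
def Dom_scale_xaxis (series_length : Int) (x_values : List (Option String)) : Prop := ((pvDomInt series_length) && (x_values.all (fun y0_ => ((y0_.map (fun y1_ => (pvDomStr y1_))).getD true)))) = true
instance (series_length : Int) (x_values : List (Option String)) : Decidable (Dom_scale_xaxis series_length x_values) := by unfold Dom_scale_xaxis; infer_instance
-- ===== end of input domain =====

-- B replaces A's element-by-element while loop (with its counter state machine) by a staged
-- block algorithm: kept positions are the arithmetic progression range(0, n, step+1), and each
-- run between consecutive kept positions is blanked with one slice assignment. Both Pythons
-- mutate x_values in place to the same final content and return it; the equivalence proved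
-- here is about the return value.

-- ===== PORT A =====
-- A's while loop: state (index, counter); x_values[index] = None is pySetD, total under Pre_
-- (Python raises IndexError exactly outside Pre_).
def scaleLoopA (step n index counter : Int) (xs : List (Option String)) : List (Option String) :=
  if h : 1 < step ∧ index < n then
    if counter < step then
      scaleLoopA step n (index + 1) (counter + 1) (PySem.List.pySetD xs index none)
    else
      scaleLoopA step n (index + 1) 0 xs
  else xs
termination_by (n - index).toNat
decreasing_by all_goals omega

-- math.ceil(series_length / 15) is exact for |series_length| ≤ 2^31 (the float error is far
-- below the 1/15 gap to the nearest integer): ported as the integer ceiling -((-n) // 15).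
def scale_xaxis (series_length : Int) (x_values : List (Option String)) : List (Option String) :=
  let step := -(PySem.Int.floordiv (-series_length) 15)
  scaleLoopA step series_length 1 0 x_values

-- ===== PORT B =====
-- Python's slice assignment xs[lo:hi] = rhs, ported by hand: exact for 0 ≤ lo ≤ hi (the only
-- case B uses), where it is xs[:lo] ++ rhs ++ xs[hi:] with both bounds clamped to the length
-- (List.take/List.drop clamp the same way).
def pySetSliceNN (xs : List (Option String)) (lo hi : Int) (rhs : List (Option String)) :
    List (Option String) :=
  xs.take lo.toNat ++ rhs ++ xs.drop hi.toNat

def scale_xaxis_alt (series_length : Int) (x_values : List (Option String)) : List (Option String) :=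
  let step := -(PySem.Int.floordiv (-series_length) 15)
  if 1 < step then
    (PySem.List.pyRange 0 series_length (step + 1)).foldl
      (fun acc kept =>
        let lo := kept + 1
        let hi := min (kept + step + 1) series_length
        pySetSliceNN acc lo hi (List.replicate (hi - lo).toNat none))
      x_values
  else x_values

-- ===== PRECONDITION & SPEC =====
-- Pre_ excludes exactly the inputs where Python A raises IndexError: when step > 1 A assigns
-- x_values[index] for every index in [1, series_length) with index % (step+1) ≠ 0, so all such
-- indices must be in range.
def Pre_scale_xaxis (series_length : Int) (x_values : List (Option String)) : Prop :=
  let step := -(PySem.Int.floordiv (-series_length) 15)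
  step ≤ 1 ∨ series_length ≤ (x_values.length : Int) ∨
    (series_length = (x_values.length : Int) + 1 ∧ PySem.Int.mod (x_values.length : Int) (step + 1) = 0)
instance (series_length : Int) (x_values : List (Option String)) : Decidable (Pre_scale_xaxis series_length x_values) := by unfold Pre_scale_xaxis; infer_instance

def pvWitness_scale_xaxis : Int × List (Option String) :=
  (30, [some "a", some "b", some "c", some "d", some "e", some "f", some "g", some "h",
        some "i", some "j", some "k", some "l", some "m", some "n", some "o", some "p",
        some "q", some "r", some "s", some "t", some "u", some "v", some "w", some "x",
        some "y", some "z", some "0", some "1", some "2", some "3"])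

def Spec_scale_xaxis (series_length : Int) (x_values : List (Option String)) (out : List (Option String)) : Prop := out = scale_xaxis_alt series_length x_values
instance (series_length : Int) (x_values : List (Option String)) (out : List (Option String)) : Decidable (Spec_scale_xaxis series_length x_values out) := by unfold Spec_scale_xaxis; infer_instance

-- ===== CLAIM (what is proved, stated in full; the proofs are below) =====
def Claim_equal_scale_xaxis : Prop := ∀ (series_length : Int) (x_values : List (Option String)), Dom_scale_xaxis series_length x_values → Pre_scale_xaxis series_length x_values → Spec_scale_xaxis series_length x_values (scale_xaxis series_length x_values)

-- ===== LEMMAS AND PROOFS =====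

-- range(a, b, s) with 0 < s unfolds one element at a time.
theorem pyRange_pos_cons {a b s : Int} (hs : 0 < s) (hab : a < b) :
    PySem.List.pyRange a b s = a :: PySem.List.pyRange (a + s) b s := by
  rw [PySem.List.pyRange_of_pos _ _ hs, PySem.List.pyRange_of_pos _ _ hs]
  have hcnt : ((b - a + s - 1) / s).toNat = ((b - (a + s) + s - 1) / s).toNat + 1 := by
    have h1 : b - a + s - 1 = (b - (a + s) + s - 1) + 1 * s := by ring
    have h2 : (b - a + s - 1) / s = (b - (a + s) + s - 1) / s + 1 := by
      rw [h1, Int.add_mul_ediv_right _ _ (by omega)]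
    have h3 : 0 ≤ (b - (a + s) + s - 1) / s := by
      by_cases h : a + s < b
      · exact Int.ediv_nonneg (by omega) (by omega)
      · have : b - (a + s) + s - 1 < s := by omega
        by_cases h' : 0 ≤ b - (a + s) + s - 1
        · exact Int.ediv_nonneg h' (by omega)
        · have := Int.ediv_le_ediv (by omega : (0:Int) < s) (le_of_lt (by omega : b - (a + s) + s - 1 < 0))
          omega
    omega
  by_cases h : a + s < b
  · rw [if_pos hab, if_pos h, hcnt, List.range_succ_eq_map, List.map_cons, List.map_map]
    congr 1
    · simp
    · apply List.map_congr_left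
      intro k _
      simp only [Function.comp_apply, Nat.succ_eq_add_one]
      push_cast
      ring
  · have hone : ((b - a + s - 1) / s).toNat = 1 := by
      have hlo : s ≤ b - a + s - 1 := by omega
      have hhi : b - a + s - 1 < 2 * s := by omega
      have h1 : 1 ≤ (b - a + s - 1) / s := by
        have := Int.le_ediv_iff_mul_le (by omega : (0:Int) < s) (a := 1) (b := b - a + s - 1)
        omega
      have h2 : (b - a + s - 1) / s < 2 := by
        have := Int.ediv_lt_iff_lt_mul (by omega : (0:Int) < s) (a := b - a + s - 1) (b := 2)
        omega
      omega
    rw [if_pos hab, if_neg h, hone]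
    simp

-- getElem? of A's single-element write.
theorem get?_pySetD_none (xs : List (Option String)) (i : Int) (hi : 0 ≤ i) (j : Nat) :
    (PySem.List.pySetD xs i (none : Option String))[j]? =
      if (j : Int) = i ∧ j < xs.length then some none else xs[j]? := by
  rw [PySem.List.pySetD_of_nonneg _ _ hi, List.getElem?_set]
  by_cases h : i.toNat = j
  · have : (j : Int) = i := by omega
    simp [h, this]
    split_ifs <;> simp_all
  · have : ¬ (j : Int) = i := by omega
    simp [h, this]

-- Elementwise characterisation of A's loop, under the counter invariant
-- index = 1 + counter + k*(step+1), 0 ≤ counter ≤ step.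
theorem scaleLoopA_get? (step n : Int) (hstep : 1 < step) :
    ∀ (m : Nat) (index counter : Int) (xs : List (Option String)),
      (n - index).toNat ≤ m → 0 ≤ counter → counter ≤ step →
      (∃ k : Nat, index = 1 + counter + (k : Int) * (step + 1)) →
      ∀ j : Nat,
        (scaleLoopA step n index counter xs)[j]? =
          if index ≤ (j : Int) ∧ (j : Int) < n ∧ (j : Int) % (step + 1) ≠ 0 ∧ j < xs.length
          then some none else xs[j]? := by
  intro m
  induction m with
  | zero =>
    intro index counter xs hm _ _ _ j
    have hni : ¬ index < n := by omega
    unfold scaleLoopA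
    rw [dif_neg (fun h => hni h.2)]
    rw [if_neg (by rintro ⟨h1, h2, _⟩; omega)]
  | succ m ih =>
    intro index counter xs hm hc0 hcs hex j
    obtain ⟨k, hk⟩ := hex
    by_cases hlt : index < n
    · have hidx0 : 0 ≤ index := by
        have hkk : (0:Int) ≤ (k:Int) * (step + 1) := mul_nonneg (Int.natCast_nonneg k) (by omega)
        omega
      unfold scaleLoopA
      rw [dif_pos ⟨hstep, hlt⟩]
      have hmod : index % (step + 1) = (1 + counter) % (step + 1) := by
        rw [hk, mul_comm]
        exact Int.add_mul_emod_self_left _ _ _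
      by_cases hcase : counter < step
      · have hmm : index % (step + 1) ≠ 0 := by
          rw [hmod, Int.emod_eq_of_lt (by omega) (by omega)]; omega
        rw [if_pos hcase]
        rw [ih (index + 1) (counter + 1) _ (by omega) (by omega) (by omega)
          ⟨k, by omega⟩ j]
        rw [PySem.List.length_pySetD]
        rw [get?_pySetD_none xs index hidx0 j]
        by_cases hji : (j : Int) = index
        · rw [if_neg (show ¬ (index + 1 ≤ (j : Int) ∧ (j : Int) < n ∧
              (j : Int) % (step + 1) ≠ 0 ∧ j < xs.length) by rintro ⟨h, _⟩; omega)]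
          by_cases hjl : j < xs.length
          · rw [if_pos ⟨hji, hjl⟩,
              if_pos (show index ≤ (j : Int) ∧ (j : Int) < n ∧
                (j : Int) % (step + 1) ≠ 0 ∧ j < xs.length from
                ⟨by omega, by omega, by rw [hji]; exact hmm, hjl⟩)]
          · rw [if_neg (show ¬ ((j : Int) = index ∧ j < xs.length) from fun h => hjl h.2),
              if_neg (show ¬ (index ≤ (j : Int) ∧ (j : Int) < n ∧
                (j : Int) % (step + 1) ≠ 0 ∧ j < xs.length) from fun h => hjl h.2.2.2)]
        · rw [if_neg (show ¬ ((j : Int) = index ∧ j < xs.length) from fun h => hji h.1)]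
          apply if_congr _ rfl rfl
          constructor
          · rintro ⟨h1, h2⟩; exact ⟨by omega, h2⟩
          · rintro ⟨h1, h2⟩
            have hne : (j : Int) ≠ index := fun h => hji h
            exact ⟨by omega, h2⟩
      · have hceq : counter = step := by omega
        have hmm0 : index % (step + 1) = 0 := by
          rw [hmod, hceq]
          have h : (1 + step) % (step + 1) = (step + 1) % (step + 1) := by ring_nf
          rw [h, Int.emod_self]
        rw [if_neg hcase]
        rw [ih (index + 1) 0 _ (by omega) (by omega) (by omega)
          ⟨k + 1, by rw [hk, hceq]; push_cast; ring⟩ j]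
        by_cases hji : (j : Int) = index
        · rw [if_neg (show ¬ (index + 1 ≤ (j : Int) ∧ (j : Int) < n ∧
              (j : Int) % (step + 1) ≠ 0 ∧ j < xs.length) by rintro ⟨h, _⟩; omega),
            if_neg (show ¬ (index ≤ (j : Int) ∧ (j : Int) < n ∧
              (j : Int) % (step + 1) ≠ 0 ∧ j < xs.length) by
              rintro ⟨_, _, h3, _⟩; exact h3 (by rw [hji]; exact hmm0))]
        · apply if_congr _ rfl rfl
          constructor
          · rintro ⟨h1, h2⟩; exact ⟨by omega, h2⟩
          · rintro ⟨h1, h2⟩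
            have hne : (j : Int) ≠ index := fun h => hji h
            exact ⟨by omega, h2⟩
    · unfold scaleLoopA
      rw [dif_neg (fun h => hlt h.2)]
      rw [if_neg (by rintro ⟨h1, h2, _⟩; omega)]

-- length and getElem? of one block slice assignment of a [None]*k run, in the in-range case
-- (hi ≤ length, or an empty run).
theorem length_setSliceRep (xs : List (Option String)) (lo hi : Int)
    (h0 : 0 ≤ lo) (hlh : lo ≤ hi) (hin : hi ≤ (xs.length : Int) ∨ lo = hi) :
    (pySetSliceNN xs lo hi (List.replicate (hi - lo).toNat none)).length = xs.length := by
  unfold pySetSliceNN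
  simp only [List.length_append, List.length_take, List.length_replicate, List.length_drop]
  omega

theorem get?_setSliceRep (xs : List (Option String)) (lo hi : Int)
    (h0 : 0 ≤ lo) (hlh : lo ≤ hi) (hin : hi ≤ (xs.length : Int) ∨ lo = hi) (j : Nat) :
    (pySetSliceNN xs lo hi (List.replicate (hi - lo).toNat none))[j]? =
      if lo ≤ (j : Int) ∧ (j : Int) < hi ∧ j < xs.length then some none else xs[j]? := by
  unfold pySetSliceNN
  rcases hin with hin | hin
  · -- hi ≤ length: all three pieces have their nominal lengths
    have hlo : lo.toNat ≤ xs.length := by omega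
    have hmidlen : (xs.take lo.toNat ++ List.replicate (hi - lo).toNat none).length = hi.toNat := by
      simp only [List.length_append, List.length_take, List.length_replicate]
      omega
    by_cases hj1 : j < lo.toNat
    · rw [List.getElem?_append_left (by omega : j < (xs.take lo.toNat ++ List.replicate (hi - lo).toNat none).length)]
      rw [List.getElem?_append_left (by simp [List.length_take]; omega)]
      rw [List.getElem?_take_of_lt hj1]
      rw [if_neg (by rintro ⟨h, _⟩; omega)]
    · by_cases hj2 : (j : Int) < hi
      · rw [List.getElem?_append_left (by omega : j < (xs.take lo.toNat ++ List.replicate (hi - lo).toNat none).length)]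
        rw [List.getElem?_append_right (by simp [List.length_take]; omega)]
        rw [List.getElem?_replicate]
        rw [if_pos (by simp [List.length_take]; omega), if_pos ⟨by omega, hj2, by omega⟩]
      · rw [List.getElem?_append_right (by omega : (xs.take lo.toNat ++ List.replicate (hi - lo).toNat none).length ≤ j)]
        rw [List.getElem?_drop]
        rw [if_neg (by rintro ⟨_, h, _⟩; omega)]
        congr 1
        omega
  · -- empty run: the list is unchanged
    subst hin
    simp only [sub_self, Int.toNat_zero, List.replicate_zero, List.append_nil]
    rw [if_neg (by rintro ⟨h1, h2, _⟩; omega)]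
    by_cases hl : lo.toNat ≤ xs.length
    · by_cases hj : j < lo.toNat
      · rw [List.getElem?_append_left (by simp [List.length_take]; omega)]
        rw [List.getElem?_take_of_lt hj]
      · rw [List.getElem?_append_right (by simp [List.length_take]; omega)]
        rw [List.getElem?_drop]
        congr 1
        simp [List.length_take]
        omega
    · have hdrop : xs.drop lo.toNat = [] := List.drop_eq_nil_of_le (by omega)
      rw [hdrop, List.append_nil, List.take_of_length_le (by omega)]

-- Elementwise characterisation of B's fold over the kept-position progression, under the
-- invariant that k is a nonnegative multiple of step+1 and the Pre_-derived shape of n.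
theorem scaleFoldB_get? (step n : Int) (hstep : 1 < step) :
    ∀ (m : Nat) (k : Int) (xs : List (Option String)),
      (n - k).toNat ≤ m → 0 ≤ k → (step + 1) ∣ k →
      (n ≤ (xs.length : Int) ∨
        (n = (xs.length : Int) + 1 ∧ (step + 1) ∣ (xs.length : Int))) →
      ∀ j : Nat,
        ((PySem.List.pyRange k n (step + 1)).foldl
          (fun acc kept =>
            let lo := kept + 1
            let hi := min (kept + step + 1) n
            pySetSliceNN acc lo hi (List.replicate (hi - lo).toNat none)) xs)[j]? =
          if k < (j : Int) ∧ (j : Int) < n ∧ (j : Int) % (step + 1) ≠ 0 ∧ j < xs.length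
          then some none else xs[j]? := by
  intro m
  induction m with
  | zero =>
    intro k xs hm hk0 hdvd hn j
    have hnk : ¬ k < n := by omega
    rw [PySem.List.pyRange_of_pos _ _ (by omega : (0:Int) < step + 1)]
    rw [if_neg hnk]
    simp only [List.range_zero, List.map_nil, List.foldl_nil]
    rw [if_neg (by rintro ⟨h1, h2, _⟩; omega)]
  | succ m ih =>
    intro k xs hm hk0 hdvd hn j
    by_cases hkn : k < n
    · rw [pyRange_pos_cons (by omega) hkn, List.foldl_cons]
      simp only []
      set lo := k + 1 with hlo
      set hi := min (k + step + 1) n with hhi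
      have hlh : lo ≤ hi := by omega
      have hin : hi ≤ (xs.length : Int) ∨ lo = hi := by
        rcases hn with hn | ⟨hn1, hn2⟩
        · left; omega
        · by_cases hcase : hi ≤ (xs.length : Int)
          · left; exact hcase
          · -- hi = length+1 forces k = length (both multiples of step+1 within step of each other)
            right
            have hdv : (step + 1) ∣ ((xs.length : Int) - k) := hn2.sub hdvd
            have hkeq : k = (xs.length : Int) := by
              by_contra hne
              have hpos : 0 < (xs.length : Int) - k := by omega
              have := Int.le_of_dvd hpos hdv
              omega
            omega
      have hlen := length_setSliceRep xs lo hi (by omega) hlh hin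
      rw [ih (k + (step + 1)) _ (by omega) (by omega) (Dvd.dvd.add hdvd ⟨1, by ring⟩)
        (by rw [hlen]; exact hn) j]
      rw [hlen]
      rw [get?_setSliceRep xs lo hi (by omega) hlh hin j]
      by_cases hblk : lo ≤ (j : Int) ∧ (j : Int) < hi ∧ j < xs.length
      · -- j lies in the blanked run
        have hmm : (j : Int) % (step + 1) ≠ 0 := by
          intro h0
          have hdv : (step + 1) ∣ ((j : Int) - k) :=
            (Int.dvd_of_emod_eq_zero h0).sub hdvd
          have hpos : 0 < (j : Int) - k := by omega
          have := Int.le_of_dvd hpos hdv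
          omega
        rw [if_neg (show ¬ (k + (step + 1) < (j : Int) ∧ (j : Int) < n ∧
            (j : Int) % (step + 1) ≠ 0 ∧ j < xs.length) by rintro ⟨h, _⟩; omega)]
        rw [if_pos hblk,
          if_pos (show k < (j : Int) ∧ (j : Int) < n ∧
            (j : Int) % (step + 1) ≠ 0 ∧ j < xs.length from
            ⟨by omega, by omega, hmm, hblk.2.2⟩)]
      · rw [if_neg hblk]
        apply if_congr _ rfl rfl
        constructor
        · rintro ⟨h1, h2⟩; exact ⟨by omega, h2⟩
        · rintro ⟨h1, h2, h3, h4⟩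
          refine ⟨?_, h2, h3, h4⟩
          by_contra hno
          by_cases hje : (j : Int) = k + (step + 1)
          · exact h3 (by rw [hje]; exact Int.emod_eq_zero_of_dvd (hdvd.add ⟨1, by ring⟩))
          · exact hblk ⟨by omega, by omega, h4⟩
    · rw [PySem.List.pyRange_of_pos _ _ (by omega : (0:Int) < step + 1)]
      rw [if_neg hkn]
      simp only [List.range_zero, List.map_nil, List.foldl_nil]
      rw [if_neg (by rintro ⟨h1, h2, _⟩; omega)]

-- ===== VERDICT (by name: the statement is the Claim_ definition above) =====
theorem scale_xaxis_spec : Claim_equal_scale_xaxis := by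
  intro n xs _ hpre
  unfold Spec_scale_xaxis scale_xaxis scale_xaxis_alt
  by_cases hstep : 1 < -(PySem.Int.floordiv (-n) 15)
  · set step := -(PySem.Int.floordiv (-n) 15) with hstepdef
    simp only [hstep, if_true]
    have hn : n ≤ (xs.length : Int) ∨
        (n = (xs.length : Int) + 1 ∧ (step + 1) ∣ (xs.length : Int)) := by
      unfold Pre_scale_xaxis at hpre
      simp only [← hstepdef] at hpre
      rcases hpre with h | h | ⟨h1, h2⟩
      · omega
      · left; exact h
      · right
        refine ⟨h1, ?_⟩
        rw [PySem.Int.mod_eq_emod_of_pos (by omega)] at h2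
        exact Int.dvd_of_emod_eq_zero h2
    apply List.ext_getElem?
    intro j
    rw [scaleLoopA_get? step n hstep (n - 1).toNat 1 0 xs (by omega) (by omega) (by omega)
      ⟨0, by omega⟩ j]
    rw [scaleFoldB_get? step n hstep (n - 0).toNat 0 xs (by omega) (by omega) ⟨0, by ring⟩ hn j]
    by_cases h1 : 1 ≤ (j : Int)
    · have h2 : (0:Int) < (j : Int) := by omega
      simp only [h1, h2, true_and]
    · have h2 : ¬ (0:Int) < (j : Int) := by omega
      simp only [h1, h2, false_and, if_false]
  · simp only [hstep, if_false]
    unfold scaleLoopA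
    rw [dif_neg (fun h => hstep h.1)]
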